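-- pv_equiv track=rewrite | github.com/gabcarn/A2-Discreta-2024 | utils/ordenations.py | smallest_last_ordering
-- ===== SOURCE A (Python) =====
-- from typing import Dict, Any, List
--
-- def smallest_last_ordering(graph: Dict[Any, Any]) -> List[Any]:
--     """Implementa a ordenação menor-por-último dos vértices do grafo dado.
--
--     Args:
--         graph (Dict[Any, Any]): Dicionário que representa o grafo, onde as chaves são
--                                 vértices e os valores são listas de vizinhos.
--
--     Returns:
--         List[Any]: Lista que representa a ordenação menor-por-último dos vértices do
--                 grafo dado.
--     """
--
--     graph_copy = {v: list(adjs) for v, adjs in graph.items()}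
--     order = []
--     degrees = {v: len(adjs) for v, adjs in graph_copy.items()}
--
--     while degrees:
--         # Encontra o vértice com menor grau atual
--         min_vertex = min(degrees.items(), key=lambda x: x[1])[0]
--
--         # Adiciona o vértice no início da ordem
--         order.insert(0, min_vertex)
--
--         # Remove o vértice do grafo e atualiza os graus
--         adjs = graph_copy[min_vertex]
--         del degrees[min_vertex]
--         del graph_copy[min_vertex]
--
--         # Atualiza os graus dos vizinhos
--         for adj in adjs:
--             if adj in degrees:  # Verifica se o vizinho ainda está no grafo
--                 graph_copy[adj].remove(min_vertex)
--                 degrees[adj] = len(graph_copy[adj])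
--
--     return order
-- ===== SOURCE B (Python) =====
-- def smallest_last_ordering(graph):
--     """Same result, simpler: no graph mutation or degree bookkeeping -- keep a set of
--     removed vertices and recompute a vertex's live degree on demand."""
--     remaining = list(graph)
--     removed = set()
--     out = []
--     while remaining:
--         v = min(remaining, key=lambda u: sum(1 for x in graph[u] if x not in removed))
--         remaining.remove(v)
--         removed.add(v)
--         out.append(v)
--     out.reverse()
--     return out
-- ===== Notes on version B (the rewrite author's own statement) =====
-- stated objective: simpler
-- what changed: B drops A's mutable graph copy and incrementally maintained degree dict entirely: it keeps only a set of removed vertices and recomputes each remaining vertex's live degree on demand when scanning for the minimum, appending to the order and reversing once instead of insert(0,...).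
-- outside the precondition, e.g. on smallest_last_ordering({1: [2], 2: [3], 3: []}): A raises ValueError, B returns [1, 2, 3]; on smallest_last_ordering({1: [3, 3], 2: [9], 3: []}): A returns [1, 2, 3], B returns [2, 1, 3]
import Mathlib
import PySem

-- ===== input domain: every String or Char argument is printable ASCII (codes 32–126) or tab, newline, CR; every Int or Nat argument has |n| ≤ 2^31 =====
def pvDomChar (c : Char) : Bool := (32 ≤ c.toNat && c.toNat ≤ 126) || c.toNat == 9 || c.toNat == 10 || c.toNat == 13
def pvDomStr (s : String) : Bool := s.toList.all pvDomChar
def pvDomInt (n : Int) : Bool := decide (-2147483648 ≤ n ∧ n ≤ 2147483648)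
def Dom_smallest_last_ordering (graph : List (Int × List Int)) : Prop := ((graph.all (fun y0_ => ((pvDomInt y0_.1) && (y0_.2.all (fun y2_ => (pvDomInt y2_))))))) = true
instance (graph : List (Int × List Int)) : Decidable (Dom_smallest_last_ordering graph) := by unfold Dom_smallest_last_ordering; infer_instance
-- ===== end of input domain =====

-- B replaces A's mutable graph copy and incrementally maintained degree dict by a removed-set
-- with live degrees recomputed on demand (objective: simpler; return values proved equal on Pre_).

-- ===== PORT A =====
-- inner loop body: 'if adj in degrees: graph_copy[adj].remove(min_vertex); degrees[adj] = len(graph_copy[adj])'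
def sloA_update (m : Int) (st : PySem.Dict Int (List Int) × PySem.Dict Int Int) (adj : Int) :
    PySem.Dict Int (List Int) × PySem.Dict Int Int :=
  if st.2.contains adj then
    match PySem.List.remove? (st.1.getD adj []) m with
    | some l => (st.1.insert adj l, st.2.insert adj (l.length : Int))
    | none => st      -- Python raises ValueError here; excluded by Pre_
  else st

-- 'while degrees:' — fuel = initial size of degrees; each iteration shrinks degrees by exactly one
def sloA_loop : Nat → PySem.Dict Int (List Int) → PySem.Dict Int Int → List Int → List Int
  | 0, _, _, order => order
  | (fuel+1), gc, degs, order =>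
    match PySem.List.min? degs.items (fun x => x.2) with
    | none => order    -- degrees empty: while loop exits
    | some p =>
      let m := p.1                                       -- min(degrees.items(), key=lambda x: x[1])[0]
      let adjs := gc.getD m []                           -- graph_copy[min_vertex] (key always present)
      let st := adjs.foldl (sloA_update m) (gc.erase m, degs.erase m)
      sloA_loop fuel st.1 st.2 (m :: order)              -- order.insert(0, min_vertex)

def smallest_last_ordering (graph : List (Int × List Int)) : List Int :=
  let gc : PySem.Dict Int (List Int) := PySem.Dict.ofList graph
  let degs : PySem.Dict Int Int := PySem.Dict.ofList (gc.items.map (fun p => (p.1, (p.2.length : Int))))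
  sloA_loop degs.size gc degs []

-- ===== PORT B =====
-- sum(1 for x in graph[u] if x not in removed)
def sloB_deg (graph : List (Int × List Int)) (removed : PySem.Set Int) (u : Int) : Nat :=
  ((PySem.Dict.ofList graph).getD u []).countP (fun x => !(PySem.Set.contains removed x))

def sloB_loop (graph : List (Int × List Int)) (remaining : List Int) (removed : PySem.Set Int)
    (out : List Int) : List Int :=
  match h : PySem.List.min? remaining (fun u => sloB_deg graph removed u) with
  | none => out.reverse                                  -- while exits; out.reverse(); return out
  | some v =>                                            -- min(remaining, key=...)
      -- remaining.remove(v) = remaining.erase v (v ∈ remaining by min?_mem)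
      sloB_loop graph (remaining.erase v) (PySem.Set.add removed v) (out ++ [v])
  termination_by remaining.length
  decreasing_by
    have hm := PySem.List.min?_mem h
    rw [List.length_erase_of_mem hm]
    have := List.length_pos_of_mem hm
    omega

def smallest_last_ordering_alt (graph : List (Int × List Int)) : List Int :=
  sloB_loop graph (PySem.Dict.ofList graph).keys PySem.Set.empty []

-- ===== PRECONDITION & SPEC =====
-- Pre_ restricts to well-formed undirected (multi)graphs: duplicate-free keys and symmetric
-- adjacency counts between listed vertices; on asymmetric graphs A may raise ValueError
-- mid-removal and otherwise its decrement-by-removal bookkeeping leaves stale degrees that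
-- are an accident of its implementation.
def Pre_smallest_last_ordering (graph : List (Int × List Int)) : Prop :=
  (graph.map Prod.fst).Nodup ∧
  ∀ p ∈ graph, ∀ q ∈ graph, p.2.count q.1 = q.2.count p.1

instance (graph : List (Int × List Int)) : Decidable (Pre_smallest_last_ordering graph) := by
  unfold Pre_smallest_last_ordering; infer_instance

def pvWitness_smallest_last_ordering : (List (Int × List Int)) := [(1, [2]), (2, [1])]

def Spec_smallest_last_ordering (graph : List (Int × List Int)) (out : List Int) : Prop := out = smallest_last_ordering_alt graph
instance (graph : List (Int × List Int)) (out : List Int) : Decidable (Spec_smallest_last_ordering graph out) := by unfold Spec_smallest_last_ordering; infer_instance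

-- ===== CLAIM (what is proved, stated in full; the proofs are below) =====
def Claim_equal_smallest_last_ordering : Prop := ∀ (graph : List (Int × List Int)), Dom_smallest_last_ordering graph → Pre_smallest_last_ordering graph → Spec_smallest_last_ordering graph (smallest_last_ordering graph)

-- ===== LEMMAS AND PROOFS =====

-- adjacency list of v in the original graph
def sloLk (graph : List (Int × List Int)) (v : Int) : List Int := (PySem.Dict.ofList graph).getD v []

-- adjacency of v with the removed vertices r deleted
def sloLive (graph : List (Int × List Int)) (r : List Int) (v : Int) : List Int :=
  (sloLk graph v).filter (fun x => !(r.contains x))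

-- erase the first n occurrences of m
def eraseCnt (l : List Int) (m : Int) : Nat → List Int
  | 0 => l
  | n+1 => eraseCnt (l.erase m) m n


lemma any_beq_decide (l : List Int) (a : Int) : (l.any fun x => x == a) = decide (a ∈ l) := by
  induction l with
  | nil => rfl
  | cons b t ih =>
    by_cases h : b = a
    · simp [List.any_cons, h]
    · simp [List.any_cons, h, Ne.symm h, ih]

lemma contains_decide (l : List Int) (a : Int) : l.contains a = decide (a ∈ l) := by
  induction l with
  | nil => rfl
  | cons b t ih =>
    show ((a == b) || t.contains a) = decide (a ∈ b :: t)
    by_cases h : a = b <;> simp [h, ih]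

lemma not_contains_append_single (r : List Int) (m x : Int) :
    (!((r ++ [m]).contains x)) = ((!(x == m)) && (!(r.contains x))) := by
  rw [List.contains_append]
  have h1 : ([m] : List Int).contains x = (x == m) := by
    show ((x == m) || false) = (x == m)
    simp
  rw [h1, Bool.not_or, Bool.and_comm]

lemma items_ofList_nodup {ν : Type} (xs : List (Int × ν)) (h : (xs.map Prod.fst).Nodup) :
    (PySem.Dict.ofList xs).items = xs := by
  have h0 : ∀ p ∈ xs, (PySem.Dict.empty : PySem.Dict Int ν).contains p.1 = false := by
    intro p _; exact PySem.Dict.contains_empty p.1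
  have hh := PySem.Dict.items_foldl_insert_fresh xs Prod.fst Prod.snd PySem.Dict.empty h0 h
  have he : PySem.Dict.ofList xs
      = xs.foldl (fun d (p : Int × ν) => d.insert p.1 p.2) PySem.Dict.empty := rfl
  rw [he]
  simpa using hh

lemma filter_ne_erase (l : List Int) (m : Int) :
    (l.erase m).filter (fun x => !(x == m)) = l.filter (fun x => !(x == m)) := by
  induction l with
  | nil => simp
  | cons a t ih =>
    by_cases hx : a = m
    · subst hx; simp [List.erase_cons_head]
    · rw [List.erase_cons_tail (by simpa using hx)]
      simp only [List.filter_cons]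
      rw [ih]

lemma eraseCnt_count (m : Int) : ∀ (n : Nat) (l : List Int), l.count m = n →
    eraseCnt l m n = l.filter (fun x => !(x == m)) := by
  intro n
  induction n with
  | zero =>
    intro l h
    have : ∀ x ∈ l, (!(x == m)) = true := by
      intro x hx
      have : x ≠ m := by rintro rfl; simp [List.count_eq_zero] at h; exact h hx
      simpa using this
    simp [eraseCnt, List.filter_eq_self.mpr this]
  | succ k ih =>
    intro l h
    have hm : m ∈ l := by
      rw [← List.count_pos_iff]; omega
    have h2 : (l.erase m).count m = k := by
      rw [List.count_erase_self, h]; omega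
    show eraseCnt (l.erase m) m k = _
    rw [ih _ h2, filter_ne_erase]

lemma foldl_pick_map {α β : Type} (f : α → β) (ra : α → α → Prop) (rb : β → β → Prop)
    [DecidableRel ra] [DecidableRel rb] (hp : ∀ x y, rb (f x) (f y) ↔ ra x y) :
    ∀ (l : List α) (acc : Option α),
    List.foldl (fun acc x => match acc with
        | none => some x | some m => if rb x m then some x else some m)
      (acc.map f) (l.map f)
    = (List.foldl (fun acc x => match acc with
        | none => some x | some m => if ra x m then some x else some m) acc l).map f := by
  intro l
  induction l with
  | nil => intro acc; rfl
  | cons a t ih =>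
    intro acc
    simp only [List.map_cons, List.foldl_cons]
    have hstep : (match acc.map f with
        | none => some (f a) | some m => if rb (f a) m then some (f a) else some m)
        = (match acc with
        | none => some a | some m => if ra a m then some a else some m).map f := by
      cases acc with
      | none => rfl
      | some mv =>
        simp only [Option.map_some]
        by_cases h : ra a mv
        · rw [if_pos ((hp a mv).mpr h), if_pos h, Option.map_some]
        · rw [if_neg (fun hh => h ((hp a mv).mp hh)), if_neg h, Option.map_some]
    rw [hstep, ih]

lemma min?_map_pair (rem : List Int) (d : Int → Nat) :
    PySem.List.min? (rem.map (fun v => (v, ((d v : Nat) : Int)))) (fun x => x.2)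
      = (PySem.List.min? rem (fun v => d v)).map (fun v => (v, ((d v : Nat) : Int))) := by
  unfold PySem.List.min?
  have := foldl_pick_map (fun v : Int => (v, ((d v : Nat) : Int)))
      (fun x y => d x < d y) (fun x y : Int × Int => x.2 < y.2)
      (by intro x y; exact Int.ofNat_lt) rem none
  simpa using this

lemma contains_mkmap {ν : Type} (rem : List Int) (g : Int → ν) (a : Int) :
    (PySem.Dict.mk (rem.map (fun v => (v, g v)))).contains a = decide (a ∈ rem) := by
  simp only [PySem.Dict.contains, PySem.Dict.items, List.any_map]
  show (rem.any fun v => v == a) = decide (a ∈ rem)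
  exact any_beq_decide rem a

lemma keys_mkmap {ν : Type} (rem : List Int) (g : Int → ν) :
    (PySem.Dict.mk (rem.map (fun v => (v, g v)))).keys = rem := by
  simp [PySem.Dict.keys, List.map_map, Function.comp_def]

lemma getD_mkmap {ν : Type} (rem : List Int) (g : Int → ν) {a : Int}
    (ha : a ∈ rem) (hnd : rem.Nodup) (d0 : ν) :
    (PySem.Dict.mk (rem.map (fun v => (v, g v)))).getD a d0 = g a := by
  apply PySem.Dict.getD_of_mem_items
  · exact List.mem_map_of_mem ha
  · rw [keys_mkmap]; exact hnd

lemma insert_mkmap {ν : Type} (rem : List Int) (g : Int → ν) {a : Int} (ha : a ∈ rem) (w : ν) :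
    (PySem.Dict.mk (rem.map (fun v => (v, g v)))).insert a w
      = PySem.Dict.mk (rem.map (fun v => (v, if v = a then w else g v))) := by
  have hc : (PySem.Dict.mk (rem.map (fun v => (v, g v)))).contains a = true := by
    rw [contains_mkmap]; simp [ha]
  unfold PySem.Dict.insert
  rw [hc]
  simp only [if_true]
  apply congrArg PySem.Dict.mk
  show List.map _ (rem.map (fun v => (v, g v))) = _
  rw [List.map_map]
  apply List.map_congr_left
  intro v _
  by_cases hv : v = a
  · subst hv; simp
  · simp [Function.comp_def, hv]

lemma erase_mkmap {ν : Type} (rem : List Int) (g : Int → ν) (m : Int) :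
    (PySem.Dict.mk (rem.map (fun v => (v, g v)))).erase m
      = PySem.Dict.mk ((rem.filter (fun x => !(x == m))).map (fun v => (v, g v))) := by
  simp [PySem.Dict.erase, List.filter_map, Function.comp_def]

lemma sloA_step_mem (m a : Int) (rem0 : List Int) (hnd : rem0.Nodup) (g : Int → List Int)
    (ha : a ∈ rem0) (hm : m ∈ g a) :
    sloA_update m
      (PySem.Dict.mk (rem0.map (fun v => (v, g v))),
       PySem.Dict.mk (rem0.map (fun v => (v, ((g v).length : Int))))) a
    = (PySem.Dict.mk (rem0.map (fun v => (v, if v = a then (g a).erase m else g v))),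
       PySem.Dict.mk (rem0.map (fun v => (v, (((if v = a then (g a).erase m else g v)).length : Int))))) := by
  have hcont : (PySem.Dict.mk (rem0.map (fun v => (v, ((g v).length : Int))))).contains a = true := by
    rw [contains_mkmap]; simp [ha]
  have hrem : PySem.List.remove? (g a) m = some ((g a).erase m) :=
    PySem.List.remove?_eq_some_erase (g a) m hm
  simp only [sloA_update, hcont, if_true, getD_mkmap rem0 g ha hnd, hrem]
  rw [insert_mkmap rem0 g ha, insert_mkmap rem0 (fun v => ((g v).length : Int)) ha]
  refine congrArg₂ Prod.mk rfl ?_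
  apply congrArg PySem.Dict.mk
  apply List.map_congr_left
  intro v _
  by_cases hv : v = a <;> simp [hv]

lemma sloA_step_notmem (m a : Int) (rem0 : List Int) (ha : a ∉ rem0) (g : Int → List Int) :
    sloA_update m
      (PySem.Dict.mk (rem0.map (fun v => (v, g v))),
       PySem.Dict.mk (rem0.map (fun v => (v, ((g v).length : Int))))) a
    = (PySem.Dict.mk (rem0.map (fun v => (v, g v))),
       PySem.Dict.mk (rem0.map (fun v => (v, ((g v).length : Int))))) := by
  have hcont : (PySem.Dict.mk (rem0.map (fun v => (v, ((g v).length : Int))))).contains a = false := by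
    rw [contains_mkmap]; simp [ha]
  simp only [sloA_update, hcont]
  simp

lemma fold_upd (m : Int) (rem0 : List Int) (hnd : rem0.Nodup) :
    ∀ (adjs : List Int) (g : Int → List Int),
    (∀ v ∈ rem0, adjs.count v ≤ (g v).count m) →
    adjs.foldl (sloA_update m)
      (PySem.Dict.mk (rem0.map (fun v => (v, g v))),
       PySem.Dict.mk (rem0.map (fun v => (v, ((g v).length : Int)))))
    = (PySem.Dict.mk (rem0.map (fun v => (v, eraseCnt (g v) m (adjs.count v)))),
       PySem.Dict.mk (rem0.map (fun v => (v, ((eraseCnt (g v) m (adjs.count v)).length : Int))))) := by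
  intro adjs
  induction adjs with
  | nil =>
    intro g _
    simp [eraseCnt]
  | cons a rest ih =>
    intro g hc
    simp only [List.foldl_cons]
    by_cases ha : a ∈ rem0
    · have hca := hc a ha
      have hcc : (a :: rest).count a = rest.count a + 1 := by simp [List.count_cons]
      have hm : m ∈ g a := by
        rw [← List.count_pos_iff]; omega
      rw [sloA_step_mem m a rem0 hnd g ha hm]
      set g' : Int → List Int := fun v => if v = a then (g a).erase m else g v with hg'
      have hc' : ∀ v ∈ rem0, rest.count v ≤ (g' v).count m := by
        intro v hv
        by_cases hva : v = a
        · subst hva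
          simp only [hg', if_pos rfl]
          rw [List.count_erase_self]
          omega
        · simp only [hg', if_neg hva]
          have := hc v hv
          simpa [List.count_cons, Ne.symm hva] using this
      rw [ih g' hc']
      have hpt : ∀ v ∈ rem0,
          eraseCnt (g' v) m (rest.count v) = eraseCnt (g v) m ((a :: rest).count v) := by
        intro v hv
        by_cases hva : v = a
        · subst hva
          rw [hcc]
          simp only [hg', if_pos rfl]
          rfl
        · rw [show (a :: rest).count v = rest.count v by simp [List.count_cons, Ne.symm hva]]
          simp only [hg', if_neg hva]
      refine congrArg₂ Prod.mk ?_ ?_ <;>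
        exact congrArg PySem.Dict.mk (List.map_congr_left (fun v hv => by rw [hpt v hv]))
    · rw [sloA_step_notmem m a rem0 ha g]
      have hc' : ∀ v ∈ rem0, rest.count v ≤ (g v).count m := by
        intro v hv
        have hva : v ≠ a := fun hh => ha (hh ▸ hv)
        have := hc v hv
        simpa [List.count_cons, Ne.symm hva] using this
      rw [ih g hc']
      have hpt : ∀ v ∈ rem0,
          eraseCnt (g v) m (rest.count v) = eraseCnt (g v) m ((a :: rest).count v) := by
        intro v hv
        have hva : v ≠ a := fun hh => ha (hh ▸ hv)
        rw [show (a :: rest).count v = rest.count v by simp [List.count_cons, Ne.symm hva]]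
      refine congrArg₂ Prod.mk ?_ ?_ <;>
        exact congrArg PySem.Dict.mk (List.map_congr_left (fun v hv => by rw [hpt v hv]))

lemma sloB_loop_none {graph : List (Int × List Int)} {rem removed out : List Int}
    (h : PySem.List.min? rem (fun u => sloB_deg graph removed u) = none) :
    sloB_loop graph rem removed out = out.reverse := by
  rw [sloB_loop]
  split
  · rfl
  · rename_i v h'
    rw [h] at h'; cases h'

lemma sloB_loop_some {graph : List (Int × List Int)} {rem removed out : List Int} {v : Int}
    (h : PySem.List.min? rem (fun u => sloB_deg graph removed u) = some v) :
    sloB_loop graph rem removed out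
      = sloB_loop graph (rem.erase v) (PySem.Set.add removed v) (out ++ [v]) := by
  rw [sloB_loop]
  split
  · rename_i h'; rw [h] at h'; cases h'
  · rename_i v' h'
    rw [h] at h'
    injection h' with hh
    rw [hh]

lemma loop_eq (graph : List (Int × List Int))
    (hnd : (graph.map Prod.fst).Nodup)
    (hsym : ∀ u v, u ∈ graph.map Prod.fst → v ∈ graph.map Prod.fst →
            (sloLk graph u).count v = (sloLk graph v).count u) :
    ∀ (n : Nat) (r rem o : List Int),
    n = rem.length →
    rem = (graph.map Prod.fst).filter (fun k => !(r.contains k)) →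
    sloA_loop n (PySem.Dict.mk (rem.map (fun v => (v, sloLive graph r v))))
                (PySem.Dict.mk (rem.map (fun v => (v, ((sloLive graph r v).length : Int))))) o.reverse
      = sloB_loop graph rem r o := by
  intro n
  induction n with
  | zero =>
    intro r rem o h1 h2
    have hrem : rem = [] := by
      cases rem with
      | nil => rfl
      | cons a t => simp at h1
    subst hrem
    rw [sloB_loop_none rfl]
    rfl
  | succ k ih =>
    intro r rem o h1 h2
    have hrnd : rem.Nodup := by rw [h2]; exact hnd.filter _
    have hrem_ne : rem ≠ [] := by rintro rfl; simp at h1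
    obtain ⟨m, hmin⟩ : ∃ m, PySem.List.min? rem (fun u => (sloLive graph r u).length) = some m := by
      cases hh : PySem.List.min? rem (fun u => (sloLive graph r u).length) with
      | none => exact absurd ((PySem.List.min?_eq_none_iff _ _).mp hh) hrem_ne
      | some m => exact ⟨m, rfl⟩
    have hmmem : m ∈ rem := PySem.List.min?_mem hmin
    have hmr : m ∉ r := by
      have h3 : m ∈ (graph.map Prod.fst).filter (fun k => !(r.contains k)) := h2 ▸ hmmem
      simpa using List.of_mem_filter h3
    have hmkeys : m ∈ graph.map Prod.fst := List.mem_of_mem_filter (h2 ▸ hmmem)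
    have hkeyB : PySem.List.min? rem (fun u => sloB_deg graph r u) = some m := by
      have hfun : (fun u => sloB_deg graph r u) = (fun u => (sloLive graph r u).length) := by
        funext u
        simp [sloB_deg, sloLive, sloLk, List.countP_eq_length_filter]
      rw [hfun]; exact hmin
    rw [sloB_loop_some hkeyB]
    -- A side: one unfolding
    have hfe : rem.filter (fun x => !(x == m)) = rem.erase m := by
      rw [List.Nodup.erase_eq_filter hrnd]
      apply List.filter_congr
      intro x _
      rfl
    have hnd' : (rem.erase m).Nodup := hrnd.erase m
    have hmemer : ∀ v ∈ rem.erase m, v ≠ m ∧ v ∈ rem := by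
      intro v hv; exact (List.Nodup.mem_erase_iff hrnd).mp hv
    have hcount : ∀ v ∈ rem.erase m,
        (sloLive graph r m).count v = (sloLive graph r v).count m := by
      intro v hv
      obtain ⟨hvne, hvrem⟩ := hmemer v hv
      have h4 : v ∈ (graph.map Prod.fst).filter (fun k => !(r.contains k)) := h2 ▸ hvrem
      have hvr : v ∉ r := by simpa using List.of_mem_filter h4
      have hvkeys : v ∈ graph.map Prod.fst := List.mem_of_mem_filter (h2 ▸ hvrem)
      have c1 : (sloLive graph r m).count v = (sloLk graph m).count v := by
        simp only [sloLive]
        exact List.count_filter (by simp [hvr])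
      have c2 : (sloLive graph r v).count m = (sloLk graph v).count m := by
        simp only [sloLive]
        exact List.count_filter (by simp [hmr])
      rw [c1, c2, hsym m v hmkeys hvkeys]
    have hcle : ∀ v ∈ rem.erase m,
        (sloLive graph r m).count v ≤ (sloLive graph r v).count m :=
      fun v hv => le_of_eq (hcount v hv)
    have hlive : ∀ v ∈ rem.erase m,
        (sloLive graph r v).filter (fun x => !(x == m)) = sloLive graph (r ++ [m]) v := by
      intro v _
      simp only [sloLive]
      rw [List.filter_filter]
      apply List.filter_congr
      intro x _
      rw [not_contains_append_single]
    have hpt : ∀ v ∈ rem.erase m,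
        eraseCnt (sloLive graph r v) m ((sloLive graph r m).count v)
          = sloLive graph (r ++ [m]) v := by
      intro v hv
      rw [hcount v hv, eraseCnt_count m _ _ rfl, hlive v hv]
    have hrem2 : rem.erase m = (graph.map Prod.fst).filter (fun x => !((r ++ [m]).contains x)) := by
      rw [← hfe, h2, List.filter_filter]
      apply List.filter_congr
      intro x _
      rw [not_contains_append_single]
    have hk : k = (rem.erase m).length := by
      have := List.length_erase_of_mem hmmem
      omega
    have hadd : PySem.Set.add r m = r ++ [m] := by
      show (if r.contains m = true then r else r ++ [m]) = r ++ [m]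
      rw [contains_decide]
      simp [hmr]
    rw [hadd]
    -- unfold sloA_loop one step
    simp only [sloA_loop, PySem.Dict.items]
    rw [min?_map_pair rem (fun v => (sloLive graph r v).length), hmin]
    simp only [Option.map_some]
    rw [getD_mkmap rem _ hmmem hrnd,
        erase_mkmap rem (fun v => sloLive graph r v) m,
        erase_mkmap rem (fun v => ((sloLive graph r v).length : Int)) m, hfe]
    rw [fold_upd m (rem.erase m) hnd' (sloLive graph r m) (fun v => sloLive graph r v) hcle]
    rw [congrArg PySem.Dict.mk (List.map_congr_left (fun v hv => by rw [hpt v hv] :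
          ∀ v ∈ rem.erase m,
            (v, eraseCnt (sloLive graph r v) m ((sloLive graph r m).count v))
              = (v, sloLive graph (r ++ [m]) v)))]
    rw [congrArg PySem.Dict.mk (List.map_congr_left (fun v hv => by rw [hpt v hv] :
          ∀ v ∈ rem.erase m,
            (v, ((eraseCnt (sloLive graph r v) m ((sloLive graph r m).count v)).length : Int))
              = (v, ((sloLive graph (r ++ [m]) v).length : Int))))]
    rw [show m :: o.reverse = (o ++ [m]).reverse by simp]
    exact ih (r ++ [m]) (rem.erase m) (o ++ [m]) hk hrem2

-- ===== VERDICT (by name: the statement is the Claim_ definition above) =====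
theorem smallest_last_ordering_spec : Claim_equal_smallest_last_ordering := by
  intro graph _hdom hpre
  obtain ⟨hnd, hsymP⟩ := hpre
  unfold Spec_smallest_last_ordering
  have hitems : (PySem.Dict.ofList graph).items = graph := items_ofList_nodup graph hnd
  have hkeys : (PySem.Dict.ofList graph).keys = graph.map Prod.fst := by
    simp [PySem.Dict.keys, hitems]
  have hknd : (PySem.Dict.ofList graph).keys.Nodup := by rw [hkeys]; exact hnd
  have hgraph : graph = (graph.map Prod.fst).map (fun v => (v, sloLk graph v)) := by
    have h := PySem.Dict.items_eq_map_keys (PySem.Dict.ofList graph) hknd []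
    rw [hitems, hkeys] at h
    simpa [sloLk] using h
  have hsym : ∀ u v, u ∈ graph.map Prod.fst → v ∈ graph.map Prod.fst →
      (sloLk graph u).count v = (sloLk graph v).count u := by
    intro u v hu hv
    obtain ⟨p, hp, hpu⟩ := List.mem_map.mp hu
    obtain ⟨q, hq, hqv⟩ := List.mem_map.mp hv
    have hlkp : sloLk graph p.1 = p.2 := by
      unfold sloLk
      apply PySem.Dict.getD_of_mem_items
      · rw [hitems]; simpa using hp
      · exact hknd
    have hlkq : sloLk graph q.1 = q.2 := by
      unfold sloLk
      apply PySem.Dict.getD_of_mem_items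
      · rw [hitems]; simpa using hq
      · exact hknd
    subst hpu; subst hqv
    rw [hlkp, hlkq]
    exact hsymP p hp q hq
  have hlive0 : ∀ v, sloLive graph [] v = sloLk graph v := by
    intro v; simp [sloLive]
  have hgl : graph = (graph.map Prod.fst).map (fun v => (v, sloLive graph [] v)) := by
    conv_lhs => rw [hgraph]
    exact List.map_congr_left (fun v _ => by rw [hlive0 v])
  have hdegl : graph.map (fun p => (p.1, (p.2.length : Int)))
      = (graph.map Prod.fst).map (fun v => (v, ((sloLive graph [] v).length : Int))) := by
    conv_lhs => rw [hgraph]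
    rw [List.map_map]
    exact List.map_congr_left (fun v _ => by simp [Function.comp_def, hlive0 v])
  have hof : PySem.Dict.ofList graph
      = PySem.Dict.mk ((graph.map Prod.fst).map (fun v => (v, sloLive graph [] v))) := by
    apply PySem.Dict.ext
    rw [hitems]
    exact hgl
  have hofd : PySem.Dict.ofList (graph.map (fun p => (p.1, (p.2.length : Int))))
      = PySem.Dict.mk ((graph.map Prod.fst).map (fun v => (v, ((sloLive graph [] v).length : Int)))) := by
    apply PySem.Dict.ext
    rw [items_ofList_nodup _ (by rw [List.map_map]; simpa [Function.comp_def] using hnd)]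
    exact hdegl
  have hsize : (PySem.Dict.ofList (graph.map (fun p => (p.1, (p.2.length : Int))))).size
      = (graph.map Prod.fst).length := by
    rw [hofd]
    simp [PySem.Dict.size]
  have hA : smallest_last_ordering graph
      = sloA_loop (graph.map Prod.fst).length
          (PySem.Dict.mk ((graph.map Prod.fst).map (fun v => (v, sloLive graph [] v))))
          (PySem.Dict.mk ((graph.map Prod.fst).map (fun v => (v, ((sloLive graph [] v).length : Int)))))
          ([] : List Int) := by
    simp only [smallest_last_ordering]
    rw [hitems, hsize, hof, hofd]
  have hB : smallest_last_ordering_alt graph = sloB_loop graph (graph.map Prod.fst) [] [] := by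
    simp only [smallest_last_ordering_alt]
    rw [hkeys]
    rfl
  rw [hA, hB]
  have := loop_eq graph hnd hsym (graph.map Prod.fst).length [] (graph.map Prod.fst) []
      rfl (by simp)
  simpa using this
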